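-- pv_equiv track=rewrite | github.com/batmen-lab/BioMANIA | src/R2APP/get_API_init_from_sourcecode_R.py | parse_r_docstring_to_json
-- ===== SOURCE A (Python) =====
-- def parse_r_docstring_to_json(docstring, keywords, func_name):
--     """
--     Parses an R function's docstring into a JSON object containing distinct sections with improved block detection logic.
--
--     :param docstring: The docstring to be parsed.
--     :param keywords: A list of keywords that are used to identify different sections in the docstring.
--     :param func_name: The name of the function for accurate block identification.
--     :return: A JSON object with each section keyed by the keyword.
--     """
--     # Remove introductory content
--     intro_marker = "Wrapper around an R function.\n\nThe docstring below is built from the R documentation."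
--     processed_docstring = docstring.replace(intro_marker, "").strip()
--     # Splitting the docstring into blocks based on keywords
--     sections = {}
--     current_block = []
--     current_keyword = None
--     lines = processed_docstring.split('\n')
--     for line in lines:
--         # Check if line starts with any of the keywords
--         if any(line.lower().startswith(keyword) for keyword in keywords):
--             if current_block:
--                 # filter empty lines and pure ---- lines from current_block
--                 current_block = [line for line in current_block if line.strip() and ('---' not in line.strip())]
--                 # Add the current block to the sections if it exists
--                 sections[current_keyword] = '\n'.join(current_block)
--                 current_block = []
--             # Extracting the keyword and ensuring it doesn't have trailing characters like '('
--             current_keyword = line.lower().split(' ')[0].split('(')[0]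
--         elif current_keyword:
--             current_block.append(line)
--     # Add the last block if it exists
--     if current_block:
--         # filter empty lines and pure ---- lines from current_block
--         current_block = [line for line in current_block if line.strip() and ('---' not in line.strip())]
--         sections[current_keyword] = '\n'.join(current_block)
--     # Ensure the function name block starts correctly
--     if not sections.get(func_name, '').startswith(func_name):
--         sections[func_name] = func_name + '(\n' + sections.get(func_name, '')
--     return sections
-- ===== SOURCE B (Python) =====
-- def parse_r_docstring_to_json(docstring, keywords, func_name):
--     """Two-pass rewrite: find keyword-line boundaries first, then build each
--     section from the slice between consecutive boundaries."""
--     intro_marker = "Wrapper around an R function.\n\nThe docstring below is built from the R documentation."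
--     lines = docstring.replace(intro_marker, "").strip().split('\n')
--     marks = [(i, line.lower().split(' ')[0].split('(')[0])
--              for i, line in enumerate(lines)
--              if any(line.lower().startswith(k) for k in keywords)]
--     sections = {}
--     for (i, kw), (j, _) in zip(marks, marks[1:] + [(len(lines), '')]):
--         if kw and j > i + 1:
--             body = [l for l in lines[i + 1:j] if l.strip() and '---' not in l.strip()]
--             sections[kw] = '\n'.join(body)
--     if not sections.get(func_name, '').startswith(func_name):
--         sections[func_name] = func_name + '(\n' + sections.get(func_name, '')
--     return sections
-- ===== Notes on version B (the rewrite author's own statement) =====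
-- stated objective: alternative
-- what changed: Replaces A's single-pass streaming accumulator (current_block/current_keyword state mutated line by line) with a two-pass boundary decomposition: first collect the index and extracted keyword of every keyword line, then build each section directly from the slice of lines between consecutive boundaries.
import Mathlib
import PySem

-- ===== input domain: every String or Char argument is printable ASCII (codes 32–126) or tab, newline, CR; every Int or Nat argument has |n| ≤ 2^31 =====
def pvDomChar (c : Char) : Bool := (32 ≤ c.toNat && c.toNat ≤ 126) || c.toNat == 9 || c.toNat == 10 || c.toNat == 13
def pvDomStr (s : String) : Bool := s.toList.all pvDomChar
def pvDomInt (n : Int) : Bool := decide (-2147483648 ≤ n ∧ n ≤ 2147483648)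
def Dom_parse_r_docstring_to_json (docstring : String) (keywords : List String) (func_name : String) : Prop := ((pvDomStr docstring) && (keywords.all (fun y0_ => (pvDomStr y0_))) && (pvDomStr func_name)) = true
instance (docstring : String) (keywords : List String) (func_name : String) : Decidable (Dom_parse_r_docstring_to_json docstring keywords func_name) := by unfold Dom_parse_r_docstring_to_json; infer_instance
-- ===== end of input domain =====

set_option maxHeartbeats 4000000


-- B rewrites A's streaming accumulator as a two-pass boundary-index decomposition
-- (first collect keyword-line indices, then build each section from the slice
-- between consecutive boundaries); same return value, no speed claim.

-- ===== PORT A =====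
-- shared literal constants / line-level helpers (these expressions appear verbatim in both Pythons)
def pvIntro : String := "Wrapper around an R function.\n\nThe docstring below is built from the R documentation."

-- any(line.lower().startswith(keyword) for keyword in keywords)
def pvIsKw (keywords : List String) (line : String) : Bool :=
  keywords.any (fun k => PySem.Str.startswith (PySem.Str.lower line) k)

-- line.lower().split(' ')[0].split('(')[0]   (split? is total here: the separators are nonempty literals,
-- and [0] of a split result is total because a split list is never empty)
def pvExtract (line : String) : String :=
  ((PySem.Str.split? (((PySem.Str.split? (PySem.Str.lower line) " ").getD []).headD "") "(").getD []).headD ""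

-- line.strip() and ('---' not in line.strip())
def pvKeep (line : String) : Bool :=
  !(PySem.Str.strip line == "") && !(PySem.Str.isIn "---" (PySem.Str.strip line))

-- '\n'.join([line for line in block if line.strip() and '---' not in line.strip()])
def pvJoinBlock (block : List String) : String :=
  PySem.Str.join "\n" (block.filter pvKeep)

-- the 'if current_block: … sections[current_keyword] = …' flush (loop body and after the loop)
def pvFlush (sections : PySem.Dict String String) (block : List String) (ck : Option String) :
    PySem.Dict String String :=
  if block.isEmpty then sections
  else match ck with
    | some k => sections.insert k (pvJoinBlock block)
    | none => sections   -- unreachable: a nonempty block implies a truthy current_keyword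

-- A's loop body, one line at a time; state = (sections, current_block, current_keyword);
-- current_keyword None ↦ none; Python truthiness: some "" is falsy like None
def pvStepA (keywords : List String)
    (st : PySem.Dict String String × List String × Option String) (line : String) :
    PySem.Dict String String × List String × Option String :=
  let (sections, block, ck) := st
  if pvIsKw keywords line then
    (pvFlush sections block ck, [], some (pvExtract line))
  else
    match ck with
    | some k => if k == "" then (sections, block, ck) else (sections, block ++ [line], ck)
    | none => (sections, block, ck)

-- the shared final fixup:  if not sections.get(func_name,'').startswith(func_name): …
def pvFixup (func_name : String) (sections : PySem.Dict String String) :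
    PySem.Dict String String :=
  if PySem.Str.startswith (sections.getD func_name "") func_name then sections
  else sections.insert func_name
        (PySem.Str.join "" [func_name, "(\n", sections.getD func_name ""])

def parse_r_docstring_to_json (docstring : String) (keywords : List String) (func_name : String) : List (String × String) :=
  let processed := PySem.Str.strip (PySem.Str.replace docstring pvIntro "")
  let lines := (PySem.Str.split? processed "\n").getD []
  let st := lines.foldl (pvStepA keywords) (PySem.Dict.empty, [], none)
  (pvFixup func_name (pvFlush st.1 st.2.1 st.2.2)).items

-- ===== PORT B =====
-- [(i, line.lower().split(' ')[0].split('(')[0]) for i, line in enumerate(lines) if any(...)]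
def pvMarks (keywords : List String) (lines : List String) (off : Int) : List (Int × String) :=
  (PySem.List.enumerate lines off).filterMap
    (fun p => if pvIsKw keywords p.2 then some (p.1, pvExtract p.2) else none)

-- B's loop body over zip(marks, marks[1:] + [(len(lines), '')])
def pvStepB (lines : List String) (sections : PySem.Dict String String)
    (q : (Int × String) × (Int × String)) : PySem.Dict String String :=
  let i := q.1.1
  let kw := q.1.2
  let j := q.2.1
  if !(kw == "") && decide (i + 1 < j) then
    sections.insert kw
      (PySem.Str.join "\n"
        ((PySem.List.slice lines (some (i + 1)) (some j)).filter pvKeep))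
  else sections

def parse_r_docstring_to_json_alt (docstring : String) (keywords : List String) (func_name : String) : List (String × String) :=
  let lines := (PySem.Str.split? (PySem.Str.strip (PySem.Str.replace docstring pvIntro "")) "\n").getD []
  let marks := pvMarks keywords lines 0
  let sections := (marks.zip (marks.tail ++ [((lines.length : Int), "")])).foldl
      (pvStepB lines) PySem.Dict.empty
  (pvFixup func_name sections).items

-- ===== PRECONDITION & SPEC =====
def Spec_parse_r_docstring_to_json (docstring : String) (keywords : List String) (func_name : String) (out : List (String × String)) : Prop := out = parse_r_docstring_to_json_alt docstring keywords func_name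
instance (docstring : String) (keywords : List String) (func_name : String) (out : List (String × String)) : Decidable (Spec_parse_r_docstring_to_json docstring keywords func_name out) := by unfold Spec_parse_r_docstring_to_json; infer_instance

-- ===== CLAIM (what is proved, stated in full; the proofs are below) =====
def Claim_equal_parse_r_docstring_to_json : Prop := ∀ (docstring : String) (keywords : List String) (func_name : String), Dom_parse_r_docstring_to_json docstring keywords func_name → Spec_parse_r_docstring_to_json docstring keywords func_name (parse_r_docstring_to_json docstring keywords func_name)

-- ===== LEMMAS AND PROOFS =====

-- proof-side: decomposition of the line list into keyword-headed segments
def pvSegs (keywords : List String) : List String → List (String × List String)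
  | [] => []
  | l :: t =>
    if pvIsKw keywords l then
      (pvExtract l, t.takeWhile (fun x => !pvIsKw keywords x)) ::
        pvSegs keywords (t.dropWhile (fun x => !pvIsKw keywords x))
    else pvSegs keywords t
termination_by ls => ls.length
decreasing_by
  · exact Nat.lt_succ_of_le (List.length_dropWhile_le _ _)
  · simp

-- proof-side: what both programs build, segment by segment
def pvBuild (d : PySem.Dict String String) : List (String × List String) → PySem.Dict String String
  | [] => d
  | (k, blk) :: ss =>
      pvBuild (if k ≠ "" ∧ blk ≠ [] then d.insert k (pvJoinBlock blk) else d) ss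

-- proof-side: B's loop with the 'next boundary' made explicit
def pvGo (lines : List String) (n : Int) (d : PySem.Dict String String) :
    List (Int × String) → PySem.Dict String String
  | [] => d
  | (i, k) :: ms =>
      pvGo lines n
        (pvStepB lines d ((i, k), (match ms with | [] => (n, "") | m :: _ => m))) ms

-- A's loop ignores a run of non-keyword lines except for accumulating them (when ck is truthy)
theorem pvWalk (keywords : List String) (pre : List String)
    (h : ∀ l ∈ pre, pvIsKw keywords l = false) (rest : List String)
    (d : PySem.Dict String String) (b : List String) (k : String) :
    (pre ++ rest).foldl (pvStepA keywords) (d, b, some k) =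
    rest.foldl (pvStepA keywords) (d, (if k == "" then b else b ++ pre), some k) := by
  induction pre generalizing b with
  | nil => simp
  | cons a pre ih =>
    have ha := h a (by simp)
    simp only [List.cons_append, List.foldl_cons]
    rw [show pvStepA keywords (d, b, some k) a =
        (d, (if k == "" then b else b ++ [a]), some k) by
      simp [pvStepA, ha]; split <;> simp]
    rw [ih (fun l hl => h l (by simp [hl]))]
    by_cases hk : k == "" <;> simp [hk]

theorem pvWalkNone (keywords : List String) (pre : List String)
    (h : ∀ l ∈ pre, pvIsKw keywords l = false) (rest : List String)
    (d : PySem.Dict String String) :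
    (pre ++ rest).foldl (pvStepA keywords) (d, [], none) =
    rest.foldl (pvStepA keywords) (d, [], none) := by
  induction pre with
  | nil => simp
  | cons a pre ih =>
    have ha := h a (by simp)
    simp only [List.cons_append, List.foldl_cons]
    rw [show pvStepA keywords (d, [], none) a = (d, [], none) by simp [pvStepA, ha]]
    exact ih (fun l hl => h l (by simp [hl]))

theorem pvSegs_append_nonkw (keywords : List String) (pre : List String)
    (h : ∀ l ∈ pre, pvIsKw keywords l = false) (rest : List String) :
    pvSegs keywords (pre ++ rest) = pvSegs keywords rest := by
  induction pre with
  | nil => simp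
  | cons a pre ih =>
    have ha := h a (by simp)
    rw [List.cons_append, pvSegs, if_neg (by simp [ha])]
    exact ih (fun l hl => h l (by simp [hl]))

theorem pvDropWhile_head {α : Type} (p : α → Bool) :
    ∀ (ls : List α) (l : α) (t : List α), ls.dropWhile p = l :: t → p l = false := by
  intro ls
  induction ls with
  | nil => simp [List.dropWhile]
  | cons a ls ih =>
    intro l t h
    by_cases hp : p a
    · rw [List.dropWhile_cons_of_pos hp] at h
      exact ih _ _ h
    · rw [List.dropWhile_cons_of_neg hp] at h
      cases h
      simpa using hp

-- A's loop from a keyword boundary, flushed at the end, builds the segments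
theorem pvLemA2 (keywords : List String) (ls : List String)
    (d : PySem.Dict String String) (k : String) :
    pvFlush (ls.foldl (pvStepA keywords) (d, [], some k)).1
      (ls.foldl (pvStepA keywords) (d, [], some k)).2.1
      (ls.foldl (pvStepA keywords) (d, [], some k)).2.2 =
    pvBuild d ((k, ls.takeWhile (fun x => !pvIsKw keywords x)) ::
      pvSegs keywords (ls.dropWhile (fun x => !pvIsKw keywords x))) := by
  have hpre : ∀ l ∈ ls.takeWhile (fun x => !pvIsKw keywords x), pvIsKw keywords l = false := by
    intro l hl
    simpa using List.mem_takeWhile_imp hl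
  have hsplit : ls.takeWhile (fun x => !pvIsKw keywords x) ++
      ls.dropWhile (fun x => !pvIsKw keywords x) = ls := List.takeWhile_append_dropWhile
  have hflush : pvFlush d (if (k == "") = true then ([] : List String)
        else [] ++ ls.takeWhile (fun x => !pvIsKw keywords x)) (some k) =
      (if k ≠ "" ∧ ls.takeWhile (fun x => !pvIsKw keywords x) ≠ [] then
        d.insert k (pvJoinBlock (ls.takeWhile (fun x => !pvIsKw keywords x))) else d) := by
    by_cases hk : k = ""
    · simp [pvFlush, hk]
    · by_cases hp : ls.takeWhile (fun x => !pvIsKw keywords x) = []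
      · simp [pvFlush, hk, hp]
      · simp [pvFlush, hk, hp]
  cases hrest : ls.dropWhile (fun x => !pvIsKw keywords x) with
  | nil =>
    conv_lhs => rw [← hsplit, hrest]
    rw [pvWalk keywords _ hpre [] d [] k]
    simp only [List.foldl_nil, pvBuild, pvSegs]
    exact hflush
  | cons l t =>
    have hkwl : pvIsKw keywords l = true := by
      have := pvDropWhile_head _ _ _ _ hrest
      simpa using this
    conv_lhs => rw [← hsplit, hrest]
    rw [pvWalk keywords _ hpre (l :: t) d [] k]
    rw [show (l :: t).foldl (pvStepA keywords)
        (d, (if (k == "") = true then ([] : List String)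
          else [] ++ ls.takeWhile (fun x => !pvIsKw keywords x)), some k) =
        t.foldl (pvStepA keywords)
          (pvFlush d (if (k == "") = true then ([] : List String)
            else [] ++ ls.takeWhile (fun x => !pvIsKw keywords x)) (some k), [],
            some (pvExtract l)) by
      rw [List.foldl_cons]
      congr 1
      simp [pvStepA, hkwl]]
    rw [hflush]
    rw [pvLemA2 keywords t _ (pvExtract l)]
    conv_rhs => rw [pvBuild]
    congr 1
    rw [pvSegs, if_pos hkwl]
termination_by ls.length
decreasing_by
  have h1 : (ls.takeWhile (fun x => !pvIsKw keywords x)).length + (l :: t).length = ls.length := by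
    rw [← hrest, ← List.length_append, hsplit]
  simp only [List.length_cons] at h1
  omega

theorem pvLemA (keywords : List String) (ls : List String) (d : PySem.Dict String String) :
    pvFlush (ls.foldl (pvStepA keywords) (d, [], none)).1
      (ls.foldl (pvStepA keywords) (d, [], none)).2.1
      (ls.foldl (pvStepA keywords) (d, [], none)).2.2 =
    pvBuild d (pvSegs keywords ls) := by
  have hpre : ∀ l ∈ ls.takeWhile (fun x => !pvIsKw keywords x), pvIsKw keywords l = false := by
    intro l hl
    simpa using List.mem_takeWhile_imp hl
  have hsplit : ls.takeWhile (fun x => !pvIsKw keywords x) ++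
      ls.dropWhile (fun x => !pvIsKw keywords x) = ls := List.takeWhile_append_dropWhile
  have hsegs : pvSegs keywords ls =
      pvSegs keywords (ls.dropWhile (fun x => !pvIsKw keywords x)) := by
    conv_lhs => rw [← hsplit]
    exact pvSegs_append_nonkw keywords _ hpre _
  cases hrest : ls.dropWhile (fun x => !pvIsKw keywords x) with
  | nil =>
    conv_lhs => rw [← hsplit, hrest]
    rw [pvWalkNone keywords _ hpre [] d]
    simp [pvFlush, hsegs, hrest, pvSegs, pvBuild]
  | cons l t =>
    have hkwl : pvIsKw keywords l = true := by
      simpa using pvDropWhile_head _ _ _ _ hrest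
    conv_lhs => rw [← hsplit, hrest]
    rw [pvWalkNone keywords _ hpre (l :: t) d]
    rw [show (l :: t).foldl (pvStepA keywords) (d, [], none) =
        t.foldl (pvStepA keywords) (d, [], some (pvExtract l)) by
      rw [List.foldl_cons]
      congr 1
      simp [pvStepA, pvFlush, hkwl]]
    rw [pvLemA2 keywords t d (pvExtract l)]
    rw [hsegs, hrest, pvSegs, if_pos hkwl]

theorem pvMarks_nil (keywords : List String) (off : Int) : pvMarks keywords [] off = [] := by
  simp [pvMarks, PySem.List.enumerate_nil]

theorem pvMarks_cons_kw (keywords : List String) (l : String) (t : List String) (off : Int)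
    (h : pvIsKw keywords l = true) :
    pvMarks keywords (l :: t) off = (off, pvExtract l) :: pvMarks keywords t (off + 1) := by
  simp [pvMarks, PySem.List.enumerate_cons, h]

theorem pvMarks_append_nonkw (keywords : List String) (pre : List String)
    (h : ∀ l ∈ pre, pvIsKw keywords l = false) (rest : List String) (off : Int) :
    pvMarks keywords (pre ++ rest) off = pvMarks keywords rest (off + pre.length) := by
  induction pre generalizing off with
  | nil => simp
  | cons a pre ih =>
    have ha := h a (by simp)
    rw [List.cons_append]
    rw [show pvMarks keywords (a :: (pre ++ rest)) off =
        pvMarks keywords (pre ++ rest) (off + 1) by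
      simp [pvMarks, PySem.List.enumerate_cons, ha]]
    rw [ih (fun l hl => h l (by simp [hl]))]
    congr 1
    simp only [List.length_cons]
    push_cast
    ring

-- B's zip-with-successor fold is pvGo
theorem pvLemZ (lines : List String) (n : Int) (ms : List (Int × String))
    (d : PySem.Dict String String) :
    (ms.zip (ms.tail ++ [(n, "")])).foldl (pvStepB lines) d = pvGo lines n d ms := by
  induction ms generalizing d with
  | nil => simp [pvGo]
  | cons x ms ih =>
    cases ms with
    | nil => simp [pvGo]
    | cons m ms' =>
      simp only [List.tail_cons] at ih ⊢
      rw [List.cons_append, List.zip_cons_cons, List.foldl_cons, ih]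
      rfl

-- B's boundary walk over the marks of a suffix builds the segments of that suffix
theorem pvGo_cons_cons (lines : List String) (n : Int) (d : PySem.Dict String String)
    (x m : Int × String) (ms : List (Int × String)) :
    pvGo lines n d (x :: m :: ms) = pvGo lines n (pvStepB lines d (x, m)) (m :: ms) := rfl

theorem pvGo_singleton (lines : List String) (n : Int) (d : PySem.Dict String String)
    (x : Int × String) :
    pvGo lines n d [x] = pvStepB lines d (x, (n, "")) := rfl

theorem pvBuild_cons (d : PySem.Dict String String) (k : String) (blk : List String)
    (ss : List (String × List String)) :
    pvBuild d ((k, blk) :: ss) =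
    pvBuild (if k ≠ "" ∧ blk ≠ [] then d.insert k (pvJoinBlock blk) else d) ss := rfl

-- one boundary step of B, re-expressed on the segment body it slices out
theorem pvStepB_eq (lines : List String) (d : PySem.Dict String String)
    (i j : Int) (kw kw2 : String) (blk : List String)
    (hs : PySem.List.slice lines (some (i + 1)) (some j) = blk)
    (hj : (i + 1 < j) ↔ blk ≠ []) :
    pvStepB lines d ((i, kw), (j, kw2)) =
    (if kw ≠ "" ∧ blk ≠ [] then d.insert kw (pvJoinBlock blk) else d) := by
  simp only [pvStepB]
  rw [hs]
  by_cases hkw : kw = ""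
  · subst hkw
    simp
  · by_cases hb : blk = []
    · have hlt : ¬ (i + 1 < j) := by
        rw [hj]
        simp [hb]
      simp [hkw, hb, hlt]
    · have hlt : i + 1 < j := hj.mpr hb
      simp [hkw, hb, hlt, pvJoinBlock]

theorem pvLemB (keywords : List String) (lines : List String) (off : Nat)
    (d : PySem.Dict String String) :
    pvGo lines (lines.length : Int) d (pvMarks keywords (lines.drop off) (off : Int)) =
    pvBuild d (pvSegs keywords (lines.drop off)) := by
  have key : ∀ (N : Nat) (off : Nat) (d : PySem.Dict String String),
      (lines.drop off).length = N →
      pvGo lines (lines.length : Int) d (pvMarks keywords (lines.drop off) (off : Int)) =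
      pvBuild d (pvSegs keywords (lines.drop off)) := by
    intro N
    induction N using Nat.strong_induction_on with
    | _ N IH =>
      intro off d hN
      have hpre : ∀ l ∈ (lines.drop off).takeWhile (fun x => !pvIsKw keywords x),
          pvIsKw keywords l = false := by
        intro l hl
        simpa using List.mem_takeWhile_imp hl
      have hsplit : (lines.drop off).takeWhile (fun x => !pvIsKw keywords x) ++
          (lines.drop off).dropWhile (fun x => !pvIsKw keywords x) = lines.drop off :=
        List.takeWhile_append_dropWhile
      have hmarks0 : pvMarks keywords (lines.drop off) (off : Int) =
          pvMarks keywords ((lines.drop off).dropWhile (fun x => !pvIsKw keywords x))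
            ((off : Int) + ((lines.drop off).takeWhile (fun x => !pvIsKw keywords x)).length) := by
        conv_lhs => rw [← hsplit]
        exact pvMarks_append_nonkw keywords _ hpre _ _
      have hsegs : pvSegs keywords (lines.drop off) =
          pvSegs keywords ((lines.drop off).dropWhile (fun x => !pvIsKw keywords x)) := by
        conv_lhs => rw [← hsplit]
        exact pvSegs_append_nonkw keywords _ hpre _
      cases hrest : (lines.drop off).dropWhile (fun x => !pvIsKw keywords x) with
      | nil =>
        rw [hmarks0, hrest, pvMarks_nil, hsegs, hrest]
        simp [pvGo, pvSegs, pvBuild]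
      | cons l t =>
        have hkwl : pvIsKw keywords l = true := by
          simpa using pvDropWhile_head _ _ _ _ hrest
        set p := ((lines.drop off).takeWhile (fun x => !pvIsKw keywords x)).length with hp
        have hds : lines.drop off =
            (lines.drop off).takeWhile (fun x => !pvIsKw keywords x) ++ l :: t := by
          rw [← hrest]
          exact hsplit.symm
        have hd1 : lines.drop (off + p + 1) = t := by
          have h1 : lines.drop (off + p + 1) = (lines.drop off).drop (p + 1) := by
            rw [List.drop_drop]
            congr 1
          rw [h1, hds]
          rw [show ((lines.drop off).takeWhile (fun x => !pvIsKw keywords x)) ++ l :: t =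
              (((lines.drop off).takeWhile (fun x => !pvIsKw keywords x)) ++ [l]) ++ t by simp]
          rw [show p + 1 = (((lines.drop off).takeWhile (fun x => !pvIsKw keywords x)) ++ [l]).length by
            simp [hp]]
          exact List.drop_left
        have hlen : t.length = lines.length - (off + p + 1) := by
          rw [← hd1, List.length_drop]
        have hmarks : pvMarks keywords (lines.drop off) (off : Int) =
            ((off : Int) + p, pvExtract l) :: pvMarks keywords t ((off : Int) + p + 1) := by
          rw [hmarks0, hrest, pvMarks_cons_kw keywords l t _ hkwl]
        have hpre2 : ∀ x ∈ t.takeWhile (fun x => !pvIsKw keywords x), pvIsKw keywords x = false := by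
          intro x hx
          simpa using List.mem_takeWhile_imp hx
        have hsplit2 : t.takeWhile (fun x => !pvIsKw keywords x) ++
            t.dropWhile (fun x => !pvIsKw keywords x) = t := List.takeWhile_append_dropWhile
        set q := (t.takeWhile (fun x => !pvIsKw keywords x)).length with hq
        have hmarks2 : pvMarks keywords t ((off : Int) + p + 1) =
            pvMarks keywords (t.dropWhile (fun x => !pvIsKw keywords x)) ((off : Int) + p + 1 + q) := by
          conv_lhs => rw [← hsplit2]
          exact pvMarks_append_nonkw keywords _ hpre2 _ _
        have hsegs2 : pvSegs keywords (lines.drop off) =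
            (pvExtract l, t.takeWhile (fun x => !pvIsKw keywords x)) ::
              pvSegs keywords (t.dropWhile (fun x => !pvIsKw keywords x)) := by
          rw [hsegs, hrest, pvSegs, if_pos hkwl]
        cases hrest2 : t.dropWhile (fun x => !pvIsKw keywords x) with
        | nil =>
          have ht : t.takeWhile (fun x => !pvIsKw keywords x) = t := by
            conv_rhs => rw [← hsplit2, hrest2]
            simp
          have hslice : PySem.List.slice lines (some (((off : Int) + p) + 1))
              (some (lines.length : Int)) = t := by
            rw [show (((off : Int) + p) + 1) = ((off + p + 1 : Nat) : Int) by push_cast; ring]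
            rw [PySem.List.slice_natCast]
            rw [hd1, ← hlen]
            exact List.take_length
          have hiff : (((off : Int) + p) + 1 < (lines.length : Int)) ↔ t ≠ [] := by
            rw [← List.length_pos_iff]
            omega
          rw [hmarks, hmarks2, hrest2, pvMarks_nil]
          rw [hsegs2, hrest2]
          rw [pvGo_singleton,
              pvStepB_eq lines d ((off : Int) + p) (lines.length : Int) (pvExtract l) ""
                (t.takeWhile (fun x => !pvIsKw keywords x)) (by rw [hslice, ht]) (by rw [ht]; exact hiff),
              pvBuild_cons]
          rw [show pvSegs keywords ([] : List String) = [] by rw [pvSegs]]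
          rfl
        | cons l2 t2 =>
          have hkwl2 : pvIsKw keywords l2 = true := by
            simpa using pvDropWhile_head _ _ _ _ hrest2
          have hd2 : lines.drop (off + p + 1 + q) = l2 :: t2 := by
            have h1 : lines.drop (off + p + 1 + q) = (lines.drop (off + p + 1)).drop q := by
              rw [List.drop_drop]
            rw [h1, hd1]
            conv_lhs => rw [← hsplit2, hq]
            rw [List.drop_left, hrest2]
          have hslice : PySem.List.slice lines (some (((off : Int) + p) + 1))
              (some (((off : Int) + p + 1) + q)) = t.takeWhile (fun x => !pvIsKw keywords x) := by
            rw [show (((off : Int) + p + 1) + q) = ((off + p + 1 + q : Nat) : Int) by push_cast; ring,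
                show (((off : Int) + p) + 1) = ((off + p + 1 : Nat) : Int) by push_cast; ring]
            rw [PySem.List.slice_natCast]
            rw [hd1]
            rw [show off + p + 1 + q - (off + p + 1) = q by omega]
            conv_lhs => rw [← hsplit2, hq]
            exact List.take_left
          have hiff : (((off : Int) + p) + 1 < ((off : Int) + p + 1 + q)) ↔
              t.takeWhile (fun x => !pvIsKw keywords x) ≠ [] := by
            rw [← List.length_pos_iff, ← hq]
            omega
          have hNlen : (lines.drop (off + p + 1 + q)).length < N := by
            rw [hd2]
            have h1 : (lines.drop off).length = p + 1 + t.length := by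
              rw [hds]
              simp [hp]
              omega
            have h2 : t.length = q + 1 + t2.length := by
              conv_lhs => rw [← hsplit2, hrest2]
              simp [hq]
              omega
            simp only [List.length_cons]
            omega
          rw [hmarks, hmarks2, hrest2]
          rw [pvMarks_cons_kw keywords l2 t2 _ hkwl2]
          rw [hsegs2, hrest2]
          rw [pvGo_cons_cons,
              pvStepB_eq lines d ((off : Int) + p) ((off : Int) + p + 1 + q) (pvExtract l)
                (pvExtract l2) (t.takeWhile (fun x => !pvIsKw keywords x)) hslice hiff,
              pvBuild_cons]
          rw [← pvMarks_cons_kw keywords l2 t2 ((off : Int) + p + 1 + q) hkwl2]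
          rw [show ((off : Int) + p + 1 + q) = ((off + p + 1 + q : Nat) : Int) by push_cast; ring]
          rw [← hd2]
          exact IH _ hNlen (off + p + 1 + q) _ rfl
  exact key _ off d rfl

-- ===== VERDICT (by name: the statement is the Claim_ definition above) =====
theorem parse_r_docstring_to_json_spec : Claim_equal_parse_r_docstring_to_json := by
  intro docstring keywords func_name _
  unfold Spec_parse_r_docstring_to_json parse_r_docstring_to_json parse_r_docstring_to_json_alt
  simp only
  rw [pvLemZ, pvLemA keywords _ PySem.Dict.empty]
  have h0 := pvLemB keywords ((PySem.Str.split? (PySem.Str.strip (PySem.Str.replace docstring pvIntro "")) "\n").getD []) 0 PySem.Dict.empty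
  simp only [List.drop_zero, Nat.cast_zero] at h0
  rw [h0]
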